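-- pv_equiv track=rewrite | github.com/christopherkeim/Underdog-Devs | More_Wordplay/solutions/get_longest_non_aeioshrtn.py | get_longest_non_aeioshrtn
-- ===== SOURCE A (Python) =====
-- def get_longest_non_aeioshrtn(scrabble_words: dict[set[str]]) -> list[str]:
--     # Define a set of my invalid_letters
--     INVALID_LETTERS: set[str] = {"A", "E", "I", "O", "S", "H", "R", "T", "N"}
--
--     # Define storage for my matches list[str]
--     matches: list[str] = []
--
--     # Initialize longest_length = 0
--     longest_length: int = 0
--
--     # Loop over every word in scrabble_words
--     for word_key in scrabble_words:
--         # Initialize the word as valid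
--         valid_word: bool = True
--         # for letter in word:
--         for letter in scrabble_words[word_key]:
--             # if letter in INVALID_LETTERS:
--             if letter in INVALID_LETTERS:
--                 # Mark this word as invalid
--                 valid_word: bool = False
--                 # break
--                 break
--         if not valid_word:
--             continue
--
--         # measure the length of this word
--         curr_length: int = len(word_key)
--
--         # elif curr_length > longest_legnth
--         if curr_length > longest_length:
--             # Update my matches as new list [current word]
--             matches: list[str] = [word_key]
--             longest_length: int = curr_length
--
--         # if curr_legnth == longest_legnth
--         elif curr_length == longest_length:
--             # append it to my matches list
--             matches.append(word_key)
--
--     # Return my matches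
--     return matches
-- ===== SOURCE B (Python) =====
-- def get_longest_non_aeioshrtn(scrabble_words: dict) -> list:
--     INVALID_LETTERS = {"A", "E", "I", "O", "S", "H", "R", "T", "N"}
--     valid_keys = [k for k in scrabble_words
--                   if INVALID_LETTERS.isdisjoint(scrabble_words[k])]
--     if not valid_keys:
--         return []
--     longest = max(len(k) for k in valid_keys)
--     return [k for k in valid_keys if len(k) == longest]
-- ===== Notes on version B (the rewrite author's own statement) =====
-- stated objective: simpler
-- what changed: Replaces A's single-pass running-max with reset-on-new-maximum by a filter of valid keys, one max() over their lengths, and a final filter keeping keys of that length.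
import Mathlib
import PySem

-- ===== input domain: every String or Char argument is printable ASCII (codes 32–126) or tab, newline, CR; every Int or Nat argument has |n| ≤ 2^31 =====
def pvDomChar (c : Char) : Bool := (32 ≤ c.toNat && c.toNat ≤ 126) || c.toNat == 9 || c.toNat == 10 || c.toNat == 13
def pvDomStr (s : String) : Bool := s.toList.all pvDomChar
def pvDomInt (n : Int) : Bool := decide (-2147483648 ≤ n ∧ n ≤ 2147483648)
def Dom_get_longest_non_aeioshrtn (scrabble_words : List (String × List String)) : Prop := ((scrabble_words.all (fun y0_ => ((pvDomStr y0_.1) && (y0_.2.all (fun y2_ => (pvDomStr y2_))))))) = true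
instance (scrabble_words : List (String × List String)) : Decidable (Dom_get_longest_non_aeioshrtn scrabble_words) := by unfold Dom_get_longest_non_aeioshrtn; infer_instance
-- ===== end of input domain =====

-- B replaces A's single-pass running-max-with-reset by filter-valid / max-length / filter-equal (simpler decomposition, same cost).


-- ===== PORT A =====
def pvInvalidLetters : List String := ["A", "E", "I", "O", "S", "H", "R", "T", "N"]

-- A's inner loop: scan the letters, break (valid_word := False) on the first invalid one.
def pvAValidLoop : List String → Bool
  | [] => true
  | letter :: rest => if letter ∈ pvInvalidLetters then false else pvAValidLoop rest

-- A's loop body: skip invalid words, else update (matches, longest_length) exactly as A does.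
def pvAStep (st : List String × Int) (kv : String × List String) : List String × Int :=
  let valid_word := pvAValidLoop kv.2
  if valid_word = false then st
  else
    let curr_length : Int := kv.1.toList.length
    if curr_length > st.2 then ([kv.1], curr_length)
    else if curr_length = st.2 then (st.1 ++ [kv.1], st.2)
    else st

def get_longest_non_aeioshrtn (scrabble_words : List (String × List String)) : List String :=
  (scrabble_words.foldl pvAStep ([], 0)).1

-- ===== PORT B =====
def get_longest_non_aeioshrtn_alt (scrabble_words : List (String × List String)) : List String :=
  let valid_keys :=
    (scrabble_words.filter
      (fun kv => PySem.Set.isdisjoint pvInvalidLetters kv.2)).map (fun kv => kv.1)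
  if valid_keys.isEmpty then []
  else
    match PySem.List.max? (valid_keys.map (fun k => (k.toList.length : Int))) (fun x => x) with
    | none => []   -- unreachable: valid_keys nonempty (Python's max is only called on a nonempty sequence)
    | some longest => valid_keys.filter (fun k => (k.toList.length : Int) == longest)

-- ===== PRECONDITION & SPEC =====
def Spec_get_longest_non_aeioshrtn (scrabble_words : List (String × List String)) (out : List String) : Prop := out = get_longest_non_aeioshrtn_alt scrabble_words
instance (scrabble_words : List (String × List String)) (out : List String) : Decidable (Spec_get_longest_non_aeioshrtn scrabble_words out) := by unfold Spec_get_longest_non_aeioshrtn; infer_instance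

-- ===== CLAIM =====
def Claim_equal_get_longest_non_aeioshrtn : Prop := ∀ (scrabble_words : List (String × List String)), Dom_get_longest_non_aeioshrtn scrabble_words → Spec_get_longest_non_aeioshrtn scrabble_words (get_longest_non_aeioshrtn scrabble_words)

-- ===== LEMMAS AND PROOFS =====

def pvLen (k : String) : Int := k.toList.length

def pvStep (st : List String × Int) (k : String) : List String × Int :=
  if pvLen k > st.2 then ([k], pvLen k)
  else if pvLen k = st.2 then (st.1 ++ [k], st.2) else st

def pvMax (ks : List String) : Int := ks.foldl (fun m k => max m (pvLen k)) 0

theorem pv_validLoop_iff (v : List String) :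
    pvAValidLoop v = true ↔ ∀ l ∈ v, l ∉ pvInvalidLetters := by
  induction v with
  | nil => simp [pvAValidLoop]
  | cons a t ih =>
    by_cases h : a ∈ pvInvalidLetters <;> simp [pvAValidLoop, h, ih]

theorem pv_valid_eq (v : List String) :
    pvAValidLoop v = PySem.Set.isdisjoint pvInvalidLetters v := by
  rw [Bool.eq_iff_iff, pv_validLoop_iff, PySem.Set.isdisjoint_iff]
  constructor
  · intro h x hx hxv
    exact h x hxv hx
  · intro h l hl hinv
    exact h _ hinv hl

theorem pvAStep_invalid (st : List String × Int) (kv : String × List String)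
    (h : pvAValidLoop kv.2 = false) : pvAStep st kv = st := by
  simp [pvAStep, h]

theorem pvAStep_valid (st : List String × Int) (kv : String × List String)
    (h : pvAValidLoop kv.2 = true) : pvAStep st kv = pvStep st kv.1 := by
  simp [pvAStep, pvStep, pvLen, h]

-- A's fold over all entries equals the pvStep fold over the valid keys only
theorem pv_fold_filter (sw : List (String × List String)) (st : List String × Int) :
    sw.foldl pvAStep st
      = ((sw.filter (fun kv => pvAValidLoop kv.2)).map (fun kv => kv.1)).foldl pvStep st := by
  induction sw generalizing st with
  | nil => rfl
  | cons kv t ih =>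
    rcases h : pvAValidLoop kv.2 with _ | _
    · rw [List.foldl_cons, pvAStep_invalid st kv h]
      simp only [List.filter_cons, h]
      exact ih st
    · rw [List.foldl_cons, pvAStep_valid st kv h]
      simp only [List.filter_cons, h]
      exact ih _

theorem pv_len_le_max (ks : List String) : ∀ j ∈ ks, pvLen j ≤ pvMax ks :=
  (PySem.List.le_foldl_max_int ks pvLen 0).2

theorem pv_fold_char (ks : List String) :
    ks.foldl pvStep ([], 0) = (ks.filter (fun k => pvLen k == pvMax ks), pvMax ks) := by
  induction ks using List.reverseRecOn with
  | nil => rfl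
  | append_singleton t k ih =>
    have hmax : pvMax (t ++ [k]) = max (pvMax t) (pvLen k) := by
      simp [pvMax, List.foldl_append]
    rcases lt_trichotomy (pvMax t) (pvLen k) with h | h | h
    · have hm : pvMax (t ++ [k]) = pvLen k := by rw [hmax]; omega
      have hnone : (t.filter fun j => pvLen j == pvLen k) = [] := by
        apply List.filter_eq_nil_iff.mpr
        intro j hj
        have := pv_len_le_max t j hj
        simp only [beq_iff_eq]
        omega
      rw [List.foldl_append, ih, hm]
      simp only [List.foldl, pvStep]
      rw [if_pos h]
      simp [List.filter_append, hnone]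
    · rw [List.foldl_append, ih]
      simp only [List.foldl, pvStep]
      have hm : pvMax (t ++ [k]) = pvMax t := by rw [hmax]; omega
      rw [if_neg (by omega), if_pos h.symm, hm]
      simp [List.filter_append, h.symm]
    · rw [List.foldl_append, ih]
      simp only [List.foldl, pvStep]
      have hm : pvMax (t ++ [k]) = pvMax t := by rw [hmax]; omega
      rw [if_neg (by omega), if_neg (by omega), hm]
      simp [List.filter_append]
      omega

-- ===== VERDICT =====
theorem get_longest_non_aeioshrtn_spec : Claim_equal_get_longest_non_aeioshrtn := by
  intro sw _
  unfold Spec_get_longest_non_aeioshrtn get_longest_non_aeioshrtn get_longest_non_aeioshrtn_alt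
  have hfilter :
      sw.filter (fun kv => PySem.Set.isdisjoint pvInvalidLetters kv.2)
        = sw.filter (fun kv => pvAValidLoop kv.2) :=
    List.filter_congr (fun kv _ => (pv_valid_eq kv.2).symm)
  rw [pv_fold_filter, hfilter, pv_fold_char]
  cases h : (sw.filter (fun kv => pvAValidLoop kv.2)).map (fun kv => kv.1) with
  | nil => simp
  | cons v vs =>
    rw [if_neg (by simp)]
    simp only [List.map_cons]
    rw [PySem.List.max?_id_cons]
    have hlen : (vs.map (fun k => ((k.toList.length : Int)))).foldl max ((v.toList.length : Int))
        = pvMax (v :: vs) := by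
      rw [List.foldl_map]
      simp [pvMax, List.foldl, pvLen]
    rw [hlen]
    rfl
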